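-- pv_equiv track=rewrite | github.com/huikinglam02gmail/Leetcode_solutions | 3722.lexicographically-smallest-string-after-reverse.py | lexSmallest
-- ===== SOURCE A (Python) =====
-- def lexSmallest(s: str) -> str:
--     result = s
--     for i in range(len(s)):
--         reversed_s = s[:i] + s[i:][::-1]
--         if reversed_s < result: result = reversed_s
--     for i in range(len(s)):
--         reversed_s = s[:i][::-1] + s[i:]
--         if reversed_s < result: result = reversed_s
--     return result
-- ===== SOURCE B (Python) =====
-- def lexSmallest(s: str) -> str:
--     # Champion-index scan over each family: candidates are represented implicitly
--     # by their split index, compared character-by-character with index arithmetic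
--     # (for the suffix family starting at the known divergence point), and only the
--     # two family champions are ever materialised as strings.
--     n = len(s)
--     if n == 0:
--         return s
--     # Suffix-reversal family c_i = s[:i] + s[i:][::-1]; champion j.  For i > j the
--     # candidates agree on s[:j], so compare only from position j on.
--     j = 0
--     for i in range(1, n):
--         for p in range(n - j):
--             x = s[j + p] if p < i - j else s[n - 1 - p + (i - j)]
--             y = s[n - 1 - p]
--             if x != y:
--                 if x < y:
--                     j = i
--                 break
--     # Prefix-reversal family d_i = s[:i][::-1] + s[i:]; champion k, compared from 0.
--     k = 0
--     for i in range(1, n):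
--         for p in range(n):
--             x = s[i - 1 - p] if p < i else s[p]
--             y = s[k - 1 - p] if p < k else s[p]
--             if x != y:
--                 if x < y:
--                     k = i
--                 break
--     a = s[:j] + s[j:][::-1]
--     b = s[:k][::-1] + s[k:]
--     return a if a < b else b
-- ===== Notes on version B (the rewrite author's own statement) =====
-- stated objective: alternative
-- what changed: A materialises all 2n reversed-prefix/suffix strings and keeps a running minimum by whole-string comparison; B never builds a candidate: each family is scanned with a champion split-index, compared character-by-character via index arithmetic (for the suffix family starting at the known divergence point j, so shared prefixes are never re-read), and only the two family champions are materialised and compared at the end.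
import Mathlib
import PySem

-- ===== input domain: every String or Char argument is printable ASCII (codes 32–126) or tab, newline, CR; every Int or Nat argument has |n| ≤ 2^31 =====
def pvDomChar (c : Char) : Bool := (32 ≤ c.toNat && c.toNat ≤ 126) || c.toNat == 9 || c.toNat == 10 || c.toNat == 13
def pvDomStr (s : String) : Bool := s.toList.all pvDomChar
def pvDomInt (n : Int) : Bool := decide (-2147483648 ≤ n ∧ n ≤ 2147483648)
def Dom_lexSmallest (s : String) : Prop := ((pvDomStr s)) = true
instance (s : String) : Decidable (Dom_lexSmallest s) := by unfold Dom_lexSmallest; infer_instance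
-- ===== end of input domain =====

-- B replaces A's "build all 2n reversed strings, keep a running minimum" with a champion-index
-- scan per family: candidates stay implicit (a split index), are compared character-by-character
-- by index arithmetic — for the suffix family starting at the known divergence point — and only
-- the two family champions are ever materialised.

-- ===== PORT A =====
-- literal transliteration of A: two loops over range(len(s)), each building the
-- reversed-slice candidate and keeping it if it is smaller ([::-1] is reverse,
-- cf. PySem.Chars.slice?_none_none_neg_one)
def lexSmallest (s : String) : String :=
  let cs := s.toList
  let result1 := (PySem.List.pyRange 0 (PySem.Str.len s)).foldl
    (fun result i =>
      let reversed_s := PySem.Chars.slice cs none (some i) ++ (PySem.Chars.slice cs (some i) none).reverse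
      if reversed_s < result then reversed_s else result) cs
  let result2 := (PySem.List.pyRange 0 (PySem.Str.len s)).foldl
    (fun result i =>
      let reversed_s := (PySem.Chars.slice cs none (some i)).reverse ++ PySem.Chars.slice cs (some i) none
      if reversed_s < result then reversed_s else result) result1
  String.ofList result2

-- ===== PORT B =====
-- transliteration of Source B: the two 'for i in range(1, n)' champion scans become foldl over
-- List.range' 1 (n-1); each inner 'for p: ... if x != y: (update); break' becomes find? of the
-- first differing position followed by the one comparison Python performs there.  Python's
-- s[idx] accesses are cs.getD idx ' ' — every index reached is in range (proved below), so the
-- default is never produced.  The final slice expressions are the usual take/drop/reverse.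
def lexSmallest_alt (s : String) : String :=
  let cs := s.toList
  let n := cs.length
  if n = 0 then s
  else
    let j := (List.range' 1 (n - 1)).foldl
      (fun j i =>
        match (List.range (n - j)).find? (fun p =>
            decide ((if p < i - j then cs.getD (j + p) ' ' else cs.getD (n - 1 - p + (i - j)) ' ')
              ≠ cs.getD (n - 1 - p) ' ')) with
        | none => j
        | some p =>
            if (if p < i - j then cs.getD (j + p) ' ' else cs.getD (n - 1 - p + (i - j)) ' ')
                < cs.getD (n - 1 - p) ' ' then i else j) 0
    let k := (List.range' 1 (n - 1)).foldl
      (fun k i =>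
        match (List.range n).find? (fun p =>
            decide ((if p < i then cs.getD (i - 1 - p) ' ' else cs.getD p ' ')
              ≠ (if p < k then cs.getD (k - 1 - p) ' ' else cs.getD p ' '))) with
        | none => k
        | some p =>
            if (if p < i then cs.getD (i - 1 - p) ' ' else cs.getD p ' ')
                < (if p < k then cs.getD (k - 1 - p) ' ' else cs.getD p ' ') then i else k) 0
    let a := cs.take j ++ (cs.drop j).reverse
    let b := (cs.take k).reverse ++ cs.drop k
    String.ofList (if a < b then a else b)

-- ===== PRECONDITION & SPEC =====
def Spec_lexSmallest (s : String) (out : String) : Prop := out = lexSmallest_alt s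
instance (s : String) (out : String) : Decidable (Spec_lexSmallest s out) := by unfold Spec_lexSmallest; infer_instance

-- ===== CLAIM (what is proved, stated in full; the proofs are below) =====
def Claim_equal_lexSmallest : Prop := ∀ (s : String), Dom_lexSmallest s → Spec_lexSmallest s (lexSmallest s)

-- ===== LEMMAS AND PROOFS =====

-- the two candidate families, as functions of the split point
def pvCandC (cs : List Char) (k : Nat) : List Char := cs.take k ++ (cs.drop k).reverse
def pvCandD (cs : List Char) (k : Nat) : List Char := (cs.take k).reverse ++ cs.drop k

-- the p-th character of each candidate, by index arithmetic (B's view of the candidates)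
def pvFS (cs : List Char) (i p : Nat) : Char :=
  if p < i then cs.getD p ' ' else cs.getD (cs.length - 1 - p + i) ' '
def pvFP (cs : List Char) (i p : Nat) : Char :=
  if p < i then cs.getD (i - 1 - p) ' ' else cs.getD p ' '

-- ===== A-side characterisation =====

-- A's running-minimum loop: the result is the initial value or a visited candidate,
-- and is ≤ the initial value and every visited candidate
theorem pvFoldlMin_spec (l : List (List Char)) (b : List Char) :
    (l.foldl (fun result x => if x < result then x else result) b = b ∨
       l.foldl (fun result x => if x < result then x else result) b ∈ l) ∧
    l.foldl (fun result x => if x < result then x else result) b ≤ b ∧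
    ∀ y ∈ l, l.foldl (fun result x => if x < result then x else result) b ≤ y := by
  induction l generalizing b with
  | nil => simp
  | cons x t ih =>
    simp only [List.foldl_cons]
    by_cases hx : x < b
    · obtain ⟨h1, h2, h3⟩ := ih x
      rw [if_pos hx]
      refine ⟨?_, ?_, ?_⟩
      · rcases h1 with h | h
        · refine Or.inr ?_
          rw [h]
          exact List.mem_cons_self
        · exact Or.inr (List.mem_cons_of_mem _ h)
      · exact le_trans h2 (le_of_lt hx)
      · intro y hy
        rcases List.mem_cons.mp hy with rfl | hy
        · exact h2
        · exact h3 y hy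
    · obtain ⟨h1, h2, h3⟩ := ih b
      rw [if_neg hx]
      refine ⟨?_, h2, ?_⟩
      · rcases h1 with h | h
        · exact Or.inl h
        · exact Or.inr (List.mem_cons_of_mem _ h)
      · intro y hy
        rcases List.mem_cons.mp hy with rfl | hy
        · exact le_trans h2 (not_lt.mp hx)
        · exact h3 y hy

theorem lexSmallest_eq_min (s : String) :
    lexSmallest s = String.ofList
      (((List.range s.toList.length).map (pvCandD s.toList)).foldl
        (fun result x => if x < result then x else result)
        (((List.range s.toList.length).map (pvCandC s.toList)).foldl
          (fun result x => if x < result then x else result) s.toList)) := by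
  have hlen : PySem.Str.len s = ((s.toList.length : Nat) : Int) := by simp [pysem]
  unfold lexSmallest
  simp only [hlen, PySem.List.pyRange_zero_natCast, List.foldl_map,
    PySem.Chars.slice_eq_listSlice, PySem.List.slice_to_natCast,
    PySem.List.slice_from_natCast, pvCandC, pvCandD]

-- characterisation of A: member of, and lower bound of, the full candidate pool
theorem pvA_spec (s : String) :
    ∃ a : List Char, lexSmallest s = String.ofList a ∧
      a ∈ s.toList :: ((List.range s.toList.length).map (pvCandC s.toList) ++
          (List.range s.toList.length).map (pvCandD s.toList)) ∧
      ∀ y ∈ s.toList :: ((List.range s.toList.length).map (pvCandC s.toList) ++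
          (List.range s.toList.length).map (pvCandD s.toList)), a ≤ y := by
  obtain ⟨hC1, hC2, hC3⟩ :=
    pvFoldlMin_spec ((List.range s.toList.length).map (pvCandC s.toList)) s.toList
  obtain ⟨hD1, hD2, hD3⟩ :=
    pvFoldlMin_spec ((List.range s.toList.length).map (pvCandD s.toList))
      (((List.range s.toList.length).map (pvCandC s.toList)).foldl
        (fun result x => if x < result then x else result) s.toList)
  refine ⟨_, lexSmallest_eq_min s, ?_, ?_⟩
  · rcases hD1 with h | h
    · rw [h]
      rcases hC1 with h' | h'
      · rw [h']; exact List.mem_cons_self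
      · exact List.mem_cons_of_mem _ (List.mem_append_left _ h')
    · exact List.mem_cons_of_mem _ (List.mem_append_right _ h)
  · intro y hy
    rcases List.mem_cons.mp hy with rfl | hy
    · exact le_trans hD2 hC2
    · rcases List.mem_append.mp hy with hy | hy
      · exact le_trans hD2 (hC3 y hy)
      · exact hD3 y hy

-- ===== B-side lemmas =====

-- a common prefix cancels in the lexicographic order
theorem pvPrefixCancel (a : List Char) : ∀ u v : List Char, (a ++ u < a ++ v) ↔ u < v := by
  induction a with
  | nil => intro u v; simp
  | cons c t ih =>
    intro u v
    rw [List.cons_append, List.cons_append, List.cons_lt_cons_iff]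
    simp [ih u v]

-- find? only looks at the predicate's values on the list
theorem pvFindCongr (l : List Nat) (p q : Nat → Bool) (h : ∀ x ∈ l, p x = q x) :
    l.find? p = l.find? q := by
  induction l with
  | nil => rfl
  | cons a t ih =>
    have ha := h a List.mem_cons_self
    simp only [List.find?_cons, ha]
    cases q a with
    | true => rfl
    | false => exact ih (fun x hx => h x (List.mem_cons_of_mem _ hx))

-- lexicographic comparison of two equal-length char sequences given pointwise,
-- decided by the first differing position (= B's inner loop)
theorem pvMapRangeLt (L : Nat) : ∀ f g : Nat → Char,
    ((List.range L).map f < (List.range L).map g ↔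
      ∃ p, (List.range L).find? (fun p => decide (f p ≠ g p)) = some p ∧ f p < g p) := by
  induction L with
  | zero =>
    intro f g
    simp only [List.range_zero, List.map_nil, List.find?_nil]
    constructor
    · intro h; cases h
    · rintro ⟨p, hp, -⟩; cases hp
  | succ L ih =>
    intro f g
    rw [List.range_succ_eq_map]
    simp only [List.map_cons, List.map_map, List.find?_cons]
    by_cases h0 : f 0 = g 0
    · have hd : (decide (f 0 ≠ g 0)) = false := by simp [h0]
      rw [hd]
      rw [List.cons_lt_cons_iff]
      have hmap : (List.map Nat.succ (List.range L)).find? (fun p => decide (f p ≠ g p)) =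
          ((List.range L).find? ((fun p => decide (f p ≠ g p)) ∘ Nat.succ)).map Nat.succ :=
        List.find?_map ..
      rw [hmap]
      have := ih (f ∘ Nat.succ) (g ∘ Nat.succ)
      constructor
      · rintro (hlt | ⟨-, hlt⟩)
        · exact absurd h0 (ne_of_lt hlt)
        · obtain ⟨p, hp, hplt⟩ := this.mp hlt
          refine ⟨p + 1, ?_, hplt⟩
          have hp' : (List.range L).find? ((fun p => decide (f p ≠ g p)) ∘ Nat.succ) = some p := hp
          rw [hp']
          rfl
      · rintro ⟨p, hp, hplt⟩
        rcases hq : (List.range L).find? ((fun p => decide (f p ≠ g p)) ∘ Nat.succ) with _ | q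
        · rw [hq] at hp; cases hp
        · rw [hq] at hp
          simp only [Option.map_some, Option.some.injEq] at hp
          subst hp
          exact Or.inr ⟨h0, this.mpr ⟨q, hq, hplt⟩⟩
    · have hd : (decide (f 0 ≠ g 0)) = true := by simp [h0]
      rw [hd]
      rw [List.cons_lt_cons_iff]
      constructor
      · rintro (hlt | ⟨heq, -⟩)
        · exact ⟨0, rfl, hlt⟩
        · exact absurd heq h0
      · rintro ⟨p, hp, hplt⟩
        simp only [Option.some.injEq] at hp
        subst hp
        exact Or.inl hplt

-- the candidates, characterised pointwise
theorem pvCandC_eq_map (cs : List Char) (i : Nat) (hi : i ≤ cs.length) :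
    pvCandC cs i = (List.range cs.length).map (pvFS cs i) := by
  unfold pvCandC
  apply List.ext_getElem
  · simp; omega
  · intro p hp hp'
    simp only [List.getElem_map, List.getElem_range]
    have hlen : (cs.take i).length = i := by simp; omega
    have hplen : p < cs.length := by
      simp only [List.length_append, hlen, List.length_reverse, List.length_drop] at hp
      omega
    by_cases hpi : p < i
    · rw [List.getElem_append_left (by omega), List.getElem_take]
      simp [pvFS, hpi, List.getElem?_eq_getElem hplen]
    · rw [List.getElem_append_right (by omega)]
      rw [List.getElem_reverse]
      rw [List.getElem_drop]
      have hidx : cs.length - 1 - p + i < cs.length := by omega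
      have : i + ((cs.drop i).length - 1 - (p - (cs.take i).length)) = cs.length - 1 - p + i := by
        simp only [List.length_drop, hlen]; omega
      simp only [this]
      simp [pvFS, hpi, List.getElem?_eq_getElem hidx]

theorem pvCandD_eq_map (cs : List Char) (i : Nat) (hi : i ≤ cs.length) :
    pvCandD cs i = (List.range cs.length).map (pvFP cs i) := by
  unfold pvCandD
  apply List.ext_getElem
  · simp; omega
  · intro p hp hp'
    simp only [List.getElem_map, List.getElem_range]
    have hlen : (cs.take i).length = i := by simp; omega
    have hplen : p < cs.length := by
      simp only [List.length_append, List.length_reverse, hlen, List.length_drop] at hp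
      omega
    by_cases hpi : p < i
    · rw [List.getElem_append_left (by simp [hlen]; omega)]
      rw [List.getElem_reverse, List.getElem_take]
      have hidx : i - 1 - p < cs.length := by omega
      have : (cs.take i).length - 1 - p = i - 1 - p := by omega
      simp only [this]
      simp [pvFP, hpi, List.getElem?_eq_getElem hidx]
    · rw [List.getElem_append_right (by simp [hlen]; omega)]
      rw [List.getElem_drop]
      have : i + (p - (cs.take i).reverse.length) = p := by simp [hlen]; omega
      simp only [this]
      simp [pvFP, hpi, List.getElem?_eq_getElem hplen]

-- comparing two suffix-family candidates with split points j < i only needs positions ≥ j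
theorem pvCandC_lt_shift (cs : List Char) (i j : Nat) (hji : j < i) (hi : i ≤ cs.length) :
    (pvCandC cs i < pvCandC cs j ↔
      (List.range (cs.length - j)).map (fun p => pvFS cs i (j + p)) <
      (List.range (cs.length - j)).map (fun p => pvFS cs j (j + p))) := by
  have hj : j ≤ cs.length := by omega
  rw [pvCandC_eq_map cs i hi, pvCandC_eq_map cs j hj]
  have hrange : List.range cs.length = List.range j ++ (List.range (cs.length - j)).map (j + ·) := by
    conv_lhs => rw [show cs.length = j + (cs.length - j) by omega]
    exact List.range_add ..
  rw [hrange]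
  simp only [List.map_append, List.map_map]
  have hpre : (List.range j).map (pvFS cs i) = (List.range j).map (pvFS cs j) := by
    apply List.map_congr_left
    intro p hp
    have hpj : p < j := List.mem_range.mp hp
    simp [pvFS, hpj, Nat.lt_of_lt_of_le hpj (le_of_lt hji)]
  rw [hpre, pvPrefixCancel]
  exact Iff.rfl

-- B's suffix-family step equals "keep the smaller candidate"
theorem pvSufStep_eq (cs : List Char) (j i : Nat) (hji : j < i) (hi : i < cs.length) :
    (match (List.range (cs.length - j)).find? (fun p =>
        decide ((if p < i - j then cs.getD (j + p) ' '
                 else cs.getD (cs.length - 1 - p + (i - j)) ' ')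
          ≠ cs.getD (cs.length - 1 - p) ' ')) with
     | none => j
     | some p =>
         if (if p < i - j then cs.getD (j + p) ' '
             else cs.getD (cs.length - 1 - p + (i - j)) ' ')
             < cs.getD (cs.length - 1 - p) ' ' then i else j) =
    (if pvCandC cs i < pvCandC cs j then i else j) := by
  have hx : ∀ p, p < cs.length - j →
      (if p < i - j then cs.getD (j + p) ' ' else cs.getD (cs.length - 1 - p + (i - j)) ' ')
        = pvFS cs i (j + p) := by
    intro p hp
    simp only [pvFS]
    by_cases hc : j + p < i
    · rw [if_pos hc, if_pos (show p < i - j by omega)]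
    · rw [if_neg hc, if_neg (show ¬ p < i - j by omega)]
      congr 1
      omega
  have hy : ∀ p, p < cs.length - j → cs.getD (cs.length - 1 - p) ' ' = pvFS cs j (j + p) := by
    intro p hp
    simp only [pvFS]
    rw [if_neg (show ¬ j + p < j by omega)]
    congr 1
    omega
  have hcongr : (List.range (cs.length - j)).find? (fun p =>
        decide ((if p < i - j then cs.getD (j + p) ' '
                 else cs.getD (cs.length - 1 - p + (i - j)) ' ')
          ≠ cs.getD (cs.length - 1 - p) ' ')) =
      (List.range (cs.length - j)).find? (fun p =>
        decide (pvFS cs i (j + p) ≠ pvFS cs j (j + p))) := by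
    apply pvFindCongr
    intro p hp
    have hplt := List.mem_range.mp hp
    simp only [hx p hplt, hy p hplt]
  rw [hcongr]
  have hiff := (pvCandC_lt_shift cs i j hji (le_of_lt hi)).trans
    (pvMapRangeLt (cs.length - j) (fun p => pvFS cs i (j + p)) (fun p => pvFS cs j (j + p)))
  rcases hfind : (List.range (cs.length - j)).find? (fun p =>
        decide (pvFS cs i (j + p) ≠ pvFS cs j (j + p))) with _ | p
  · have hnlt : ¬ pvCandC cs i < pvCandC cs j := by
      intro h
      obtain ⟨p, hp, -⟩ := hiff.mp h
      rw [hfind] at hp; cases hp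
    simp [hnlt]
  · have hplt := List.mem_range.mp (List.mem_of_find?_eq_some hfind)
    by_cases hlt : pvFS cs i (j + p) < pvFS cs j (j + p)
    · have hcl : pvCandC cs i < pvCandC cs j := hiff.mpr ⟨p, hfind, hlt⟩
      simp only [hx p hplt, hy p hplt]
      simp [hcl, hlt]
    · have hnc : ¬ pvCandC cs i < pvCandC cs j := by
        intro h
        obtain ⟨q, hq, hqlt⟩ := hiff.mp h
        rw [hfind] at hq
        cases hq
        exact hlt hqlt
      simp only [hx p hplt, hy p hplt]
      simp [hnc, hlt]

-- B's prefix-family step equals "keep the smaller candidate"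
theorem pvPreStep_eq (cs : List Char) (k i : Nat) (hi : i ≤ cs.length) (hk : k ≤ cs.length) :
    (match (List.range cs.length).find? (fun p =>
        decide ((if p < i then cs.getD (i - 1 - p) ' ' else cs.getD p ' ')
          ≠ (if p < k then cs.getD (k - 1 - p) ' ' else cs.getD p ' '))) with
     | none => k
     | some p =>
         if (if p < i then cs.getD (i - 1 - p) ' ' else cs.getD p ' ')
             < (if p < k then cs.getD (k - 1 - p) ' ' else cs.getD p ' ') then i else k) =
    (if pvCandD cs i < pvCandD cs k then i else k) := by
  show (match (List.range cs.length).find? (fun p => decide (pvFP cs i p ≠ pvFP cs k p)) with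
        | none => k
        | some p => if pvFP cs i p < pvFP cs k p then i else k) =
      (if pvCandD cs i < pvCandD cs k then i else k)
  have hiff : pvCandD cs i < pvCandD cs k ↔
      ∃ p, (List.range cs.length).find? (fun p => decide (pvFP cs i p ≠ pvFP cs k p)) = some p ∧
        pvFP cs i p < pvFP cs k p := by
    rw [pvCandD_eq_map cs i hi, pvCandD_eq_map cs k hk]
    exact pvMapRangeLt cs.length (pvFP cs i) (pvFP cs k)
  rcases hfind : (List.range cs.length).find? (fun p => decide (pvFP cs i p ≠ pvFP cs k p))
    with _ | p
  · have hnlt : ¬ pvCandD cs i < pvCandD cs k := by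
      intro h
      obtain ⟨p, hp, -⟩ := hiff.mp h
      rw [hfind] at hp; cases hp
    simp [hnlt]
  · by_cases hlt : pvFP cs i p < pvFP cs k p
    · simp [hlt, hiff.mpr ⟨p, hfind, hlt⟩]
    · have hnc : ¬ pvCandD cs i < pvCandD cs k := by
        intro h
        obtain ⟨q, hq, hqlt⟩ := hiff.mp h
        rw [hfind] at hq
        cases hq
        exact hlt hqlt
      simp [hlt, hnc]

-- the champion scan: folding "keep the smaller candidate" over an increasing index range
-- yields a lower bound of all visited candidates and of the initial one
theorem pvChamp (n : Nat) (v : Nat → List Char) (step : Nat → Nat → Nat)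
    (hstep : ∀ j i, j < i → i < n → step j i = if v i < v j then i else j) :
    ∀ (b a j0 : Nat), j0 < a → a + b ≤ n →
      (((List.range' a b).foldl step j0 = j0 ∨ (List.range' a b).foldl step j0 ∈ List.range' a b) ∧
       v ((List.range' a b).foldl step j0) ≤ v j0 ∧
       ∀ t ∈ List.range' a b, v ((List.range' a b).foldl step j0) ≤ v t) := by
  intro b
  induction b with
  | zero => intro a j0 _ _; simp
  | succ b ih =>
    intro a j0 hj0 hab
    rw [List.range'_succ]
    simp only [List.foldl_cons]
    have ha : a < n := by omega
    rw [hstep j0 a hj0 ha]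
    by_cases hlt : v a < v j0
    · rw [if_pos hlt]
      obtain ⟨h1, h2, h3⟩ := ih (a + 1) a (by omega) (by omega)
      refine ⟨?_, le_trans h2 (le_of_lt hlt), ?_⟩
      · rcases h1 with h | h
        · exact Or.inr (by rw [h]; exact List.mem_cons_self)
        · exact Or.inr (List.mem_cons_of_mem _ h)
      · intro t ht
        rcases List.mem_cons.mp ht with rfl | ht
        · exact h2
        · exact h3 t ht
    · rw [if_neg hlt]
      obtain ⟨h1, h2, h3⟩ := ih (a + 1) j0 (by omega) (by omega)
      refine ⟨?_, h2, ?_⟩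
      · rcases h1 with h | h
        · exact Or.inl h
        · exact Or.inr (List.mem_cons_of_mem _ h)
      · intro t ht
        rcases List.mem_cons.mp ht with rfl | ht
        · exact le_trans h2 (not_lt.mp hlt)
        · exact h3 t ht

theorem pvCandD_zero (cs : List Char) : pvCandD cs 0 = cs := by simp [pvCandD]

-- B computes a member of the full pool that is a lower bound of the full pool
theorem pvB_spec (s : String) (hne : s.toList ≠ []) :
    ∃ b : List Char, lexSmallest_alt s = String.ofList b ∧
      b ∈ s.toList :: ((List.range s.toList.length).map (pvCandC s.toList) ++
          (List.range s.toList.length).map (pvCandD s.toList)) ∧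
      ∀ y ∈ s.toList :: ((List.range s.toList.length).map (pvCandC s.toList) ++
          (List.range s.toList.length).map (pvCandD s.toList)), b ≤ y := by
  set cs := s.toList with hcs
  have hn0 : cs.length ≠ 0 := by
    intro h
    exact hne (List.eq_nil_of_length_eq_zero h)
  set J := (List.range' 1 (cs.length - 1)).foldl
      (fun j i =>
        match (List.range (cs.length - j)).find? (fun p =>
            decide ((if p < i - j then cs.getD (j + p) ' '
                     else cs.getD (cs.length - 1 - p + (i - j)) ' ')
              ≠ cs.getD (cs.length - 1 - p) ' ')) with
        | none => j
        | some p =>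
            if (if p < i - j then cs.getD (j + p) ' '
                else cs.getD (cs.length - 1 - p + (i - j)) ' ')
                < cs.getD (cs.length - 1 - p) ' ' then i else j) 0 with hJ
  set K := (List.range' 1 (cs.length - 1)).foldl
      (fun k i =>
        match (List.range cs.length).find? (fun p =>
            decide ((if p < i then cs.getD (i - 1 - p) ' ' else cs.getD p ' ')
              ≠ (if p < k then cs.getD (k - 1 - p) ' ' else cs.getD p ' '))) with
        | none => k
        | some p =>
            if (if p < i then cs.getD (i - 1 - p) ' ' else cs.getD p ' ')
                < (if p < k then cs.getD (k - 1 - p) ' ' else cs.getD p ' ') then i else k) 0 with hK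
  have hBeq : lexSmallest_alt s = String.ofList
      (if pvCandC cs J < pvCandD cs K then pvCandC cs J else pvCandD cs K) := by
    simp only [lexSmallest_alt]
    rw [← hcs]
    rw [if_neg hn0]
    rw [← hJ, ← hK]
    rfl
  obtain ⟨hJ1, hJ2, hJ3⟩ := pvChamp cs.length (pvCandC cs)
    (fun j i =>
        match (List.range (cs.length - j)).find? (fun p =>
            decide ((if p < i - j then cs.getD (j + p) ' '
                     else cs.getD (cs.length - 1 - p + (i - j)) ' ')
              ≠ cs.getD (cs.length - 1 - p) ' ')) with
        | none => j
        | some p =>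
            if (if p < i - j then cs.getD (j + p) ' '
                else cs.getD (cs.length - 1 - p + (i - j)) ' ')
                < cs.getD (cs.length - 1 - p) ' ' then i else j)
    (fun j i hji hi => pvSufStep_eq cs j i hji hi)
    (cs.length - 1) 1 0 (by omega) (by omega)
  obtain ⟨hK1, hK2, hK3⟩ := pvChamp cs.length (pvCandD cs)
    (fun k i =>
        match (List.range cs.length).find? (fun p =>
            decide ((if p < i then cs.getD (i - 1 - p) ' ' else cs.getD p ' ')
              ≠ (if p < k then cs.getD (k - 1 - p) ' ' else cs.getD p ' '))) with
        | none => k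
        | some p =>
            if (if p < i then cs.getD (i - 1 - p) ' ' else cs.getD p ' ')
                < (if p < k then cs.getD (k - 1 - p) ' ' else cs.getD p ' ') then i else k)
    (fun k i hki hi => pvPreStep_eq cs k i (le_of_lt hi) (by omega))
    (cs.length - 1) 1 0 (by omega) (by omega)
  rw [← hJ] at hJ1 hJ2 hJ3
  rw [← hK] at hK1 hK2 hK3
  have hJlt : J < cs.length := by
    rcases hJ1 with h | h
    · rw [h]; omega
    · have := List.mem_range'_1.mp h; omega
  have hKlt : K < cs.length := by
    rcases hK1 with h | h
    · rw [h]; omega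
    · have := List.mem_range'_1.mp h; omega
  have hJlb : ∀ t, t < cs.length → pvCandC cs J ≤ pvCandC cs t := by
    intro t ht
    rcases Nat.eq_zero_or_pos t with rfl | ht1
    · exact hJ2
    · exact hJ3 t (List.mem_range'_1.mpr ⟨ht1, by omega⟩)
  have hKlb : ∀ t, t < cs.length → pvCandD cs K ≤ pvCandD cs t := by
    intro t ht
    rcases Nat.eq_zero_or_pos t with rfl | ht1
    · exact hK2
    · exact hK3 t (List.mem_range'_1.mpr ⟨ht1, by omega⟩)
  refine ⟨if pvCandC cs J < pvCandD cs K then pvCandC cs J else pvCandD cs K, hBeq, ?_, ?_⟩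
  · by_cases hc : pvCandC cs J < pvCandD cs K
    · rw [if_pos hc]
      exact List.mem_cons_of_mem _ (List.mem_append_left _
        (List.mem_map.mpr ⟨J, List.mem_range.mpr hJlt, rfl⟩))
    · rw [if_neg hc]
      exact List.mem_cons_of_mem _ (List.mem_append_right _
        (List.mem_map.mpr ⟨K, List.mem_range.mpr hKlt, rfl⟩))
  · have hbC : (if pvCandC cs J < pvCandD cs K then pvCandC cs J else pvCandD cs K)
        ≤ pvCandC cs J := by
      split_ifs with hc
      · exact le_refl _
      · exact not_lt.mp hc
    have hbD : (if pvCandC cs J < pvCandD cs K then pvCandC cs J else pvCandD cs K)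
        ≤ pvCandD cs K := by
      split_ifs with hc
      · exact le_of_lt hc
      · exact le_refl _
    intro y hy
    rcases List.mem_cons.mp hy with rfl | hy
    · exact le_of_le_of_eq (le_trans hbD (hKlb 0 (by omega))) (pvCandD_zero cs)
    · rcases List.mem_append.mp hy with hy | hy
      · obtain ⟨t, ht, rfl⟩ := List.mem_map.mp hy
        exact le_trans hbC (hJlb t (List.mem_range.mp ht))
      · obtain ⟨t, ht, rfl⟩ := List.mem_map.mp hy
        exact le_trans hbD (hKlb t (List.mem_range.mp ht))

-- ===== VERDICT (by name: the statement is the Claim_ definition above) =====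
theorem lexSmallest_spec : Claim_equal_lexSmallest := by
  intro s _
  unfold Spec_lexSmallest
  by_cases hne : s.toList = []
  · have h1 : lexSmallest_alt s = s := by
      simp [lexSmallest_alt, hne]
    rw [h1, lexSmallest_eq_min s]
    simp only [hne, List.length_nil, List.range_zero, List.map_nil, List.foldl_nil]
    rw [← hne, String.ofList_toList]
  · obtain ⟨a, hA, haMem, haLB⟩ := pvA_spec s
    obtain ⟨b, hB, hbMem, hbLB⟩ := pvB_spec s hne
    rw [hA, hB, le_antisymm (haLB b hbMem) (hbLB a haMem)]
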